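-- pv_equiv track=rewrite | github.com/Y108/Sequences | theta/sequence_generators.py | FracDel
-- ===== SOURCE A (Python) =====
-- def FracDel(n):
--     A = [3]
--     def sub(A, j):
--         B = [x for x in A for y in range(2)]
--         i = 0
--         C = [(7 + (i := i + B[k])) % 4 for k in range(2**(j+1)-2)]
--         return [3] + C
--     for j in range(n):
--         A = sub(A, j)
--     return A
-- ===== SOURCE B (Python) =====
-- def _term(p):
--     # closed form for the p-th term (1-based) of the limit sequence:
--     # write p = 2**e * q with q odd; term is 2 when e is odd, else
--     # 3 or 1 according to the Thue-Morse bit (popcount parity) of (q-1)//2.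
--     e = 0
--     while p % 2 == 0:
--         p //= 2
--         e += 1
--     if e % 2 == 1:
--         return 2
--     m = (p - 1) // 2
--     return 3 if m.bit_count() % 2 == 0 else 1
--
--
-- def FracDel(n):
--     length = 2 ** n - 1 if n >= 1 else 1
--     return [_term(p) for p in range(1, length + 1)]
-- ===== Notes on version B (the rewrite author's own statement) =====
-- stated objective: alternative
-- what changed: B abandons the level-by-level rebuild entirely: it computes each term directly from its 1-based index p by a closed form (write p = 2**e * q with q odd; the term is 2 when e is odd, else 3 or 1 by the popcount parity of (q-1)//2), emitting the 2**n - 1 terms in one comprehension.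
import Mathlib
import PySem

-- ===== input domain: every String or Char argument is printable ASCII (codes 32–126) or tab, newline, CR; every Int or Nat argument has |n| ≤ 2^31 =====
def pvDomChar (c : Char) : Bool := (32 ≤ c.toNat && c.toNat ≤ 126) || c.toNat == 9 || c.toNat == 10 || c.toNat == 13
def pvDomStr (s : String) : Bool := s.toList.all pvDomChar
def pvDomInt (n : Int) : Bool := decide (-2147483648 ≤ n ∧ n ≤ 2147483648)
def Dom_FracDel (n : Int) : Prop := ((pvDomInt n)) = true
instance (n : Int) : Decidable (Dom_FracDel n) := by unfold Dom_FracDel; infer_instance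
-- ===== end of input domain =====

-- B replaces A's level-by-level rebuild with a closed form computing each term
-- directly from its 1-based index (objective: alternative algorithm).

-- ===== PORT A =====
-- Python helper 'sub(A, j)'. The index k into B is always in range (B has
-- 2*len(A) elements and the range never exceeds that inside FracDel's loop),
-- so pyGetD's default 0 is never used; this is proved in the lemmas below.
def FracDelSub (A : List Int) (j : Int) : List Int :=
  let B := A.flatMap (fun x => (PySem.List.pyRange 0 2 1).map (fun _ => x))
  let C := ((PySem.List.pyRange 0 ((2:Int) ^ (j + 1).toNat - 2) 1).foldl
      (fun (p : Int × List Int) k =>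
        let i := p.1 + PySem.List.pyGetD B k 0
        (i, p.2 ++ [PySem.Int.mod (7 + i) 4])) ((0 : Int), ([] : List Int))).2
  [3] ++ C

def FracDel (n : Int) : List Int :=
  (PySem.List.pyRange 0 n 1).foldl (fun A j => FracDelSub A j) [3]

-- ===== PORT B =====
-- the 'while p % 2 == 0' loop of _term; '1 ≤ p' is a totality guard only
-- (every call inside FracDel_alt has p ≥ 1, where Python's loop terminates too)
def pvTermLoop (p : Int) (e : Int) : Int × Int :=
  if _h : 1 ≤ p ∧ PySem.Int.mod p 2 = 0 then
    pvTermLoop (PySem.Int.floordiv p 2) (e + 1)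
  else (p, e)
termination_by p.toNat
decreasing_by
  have h2 : PySem.Int.floordiv p 2 = p / 2 := PySem.Int.floordiv_eq_ediv_of_pos (by omega)
  rw [h2]; omega

-- Python helper '_term(p)'; 'bin/bit_count' parity via PySem.Int.bitCount
def pvTerm (p : Int) : Int :=
  let pe := pvTermLoop p 0
  if PySem.Int.mod pe.2 2 = 1 then 2
  else if PySem.Int.bitCount (PySem.Int.floordiv (pe.1 - 1) 2) % 2 = 0 then 3
  else 1

def FracDel_alt (n : Int) : List Int :=
  let length : Int := if 1 ≤ n then 2 ^ n.toNat - 1 else 1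
  (PySem.List.pyRange 1 (length + 1) 1).map pvTerm

-- ===== PRECONDITION & SPEC =====
def Spec_FracDel (n : Int) (out : List Int) : Prop := out = FracDel_alt n
instance (n : Int) (out : List Int) : Decidable (Spec_FracDel n out) := by unfold Spec_FracDel; infer_instance

-- ===== CLAIM (what is proved, stated in full; the proofs are below) =====
def Claim_equal_FracDel : Prop := ∀ (n : Int), Dom_FracDel n → Spec_FracDel n (FracDel n)

-- ===== LEMMAS AND PROOFS =====

-- 2-adic valuation and odd part (Nat mirror of the _term loop)
def pvV2 (m : Nat) : Nat :=
  if _h : m % 2 = 0 ∧ m ≠ 0 then pvV2 (m / 2) + 1 else 0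
termination_by m
decreasing_by omega

def pvQ (m : Nat) : Nat :=
  if _h : m % 2 = 0 ∧ m ≠ 0 then pvQ (m / 2) else m
termination_by m
decreasing_by omega

def pvBits (m : Nat) : Nat := PySem.Int.bitCount (m : Int)

-- closed-form term (Nat index, 1-based)
def pvF (p : Nat) : Int :=
  if pvV2 p % 2 = 1 then 2
  else if pvBits ((pvQ p - 1) / 2) % 2 = 0 then 3 else 1

def pvS : Nat → Int
  | 0 => 0
  | m + 1 => pvS m + pvF (m + 1)

def pvE (L : Nat) : List Int := (List.range' 1 L).map pvF

def pvStepB (p : Int × List Int) (x : Int) : Int × List Int :=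
  (p.1 + x + x,
    p.2 ++ [PySem.Int.mod (7 + (p.1 + x)) 4] ++ [PySem.Int.mod (7 + (p.1 + x + x)) 4])

theorem pvV2_odd (m : Nat) (h : m % 2 = 1) : pvV2 m = 0 := by
  rw [pvV2]; simp [h]

theorem pvQ_odd (m : Nat) (h : m % 2 = 1) : pvQ m = m := by
  rw [pvQ]; simp [h]

theorem pvV2_even (m : Nat) (h : 1 ≤ m) : pvV2 (2 * m) = pvV2 m + 1 := by
  rw [pvV2]; simp [Nat.mul_div_cancel_left m (by norm_num : 0 < 2)]; omega

theorem pvQ_even (m : Nat) (h : 1 ≤ m) : pvQ (2 * m) = pvQ m := by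
  rw [pvQ]; simp [Nat.mul_div_cancel_left m (by norm_num : 0 < 2)]; omega

theorem pvQ_pos (m : Nat) : ∀ _h : 1 ≤ m, 1 ≤ pvQ m := by
  induction m using Nat.strong_induction_on with
  | _ m ih =>
    intro h
    rcases Nat.mod_two_eq_zero_or_one m with he | ho
    · obtain ⟨r, rfl⟩ : ∃ r, m = 2 * r := ⟨m / 2, by omega⟩
      rw [pvQ_even r (by omega)]
      exact ih r (by omega) (by omega)
    · rw [pvQ_odd m ho]; exact h

theorem pvQ_odd_result (m : Nat) : ∀ _h : 1 ≤ m, pvQ m % 2 = 1 := by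
  induction m using Nat.strong_induction_on with
  | _ m ih =>
    intro h
    rcases Nat.mod_two_eq_zero_or_one m with he | ho
    · obtain ⟨r, rfl⟩ : ∃ r, m = 2 * r := ⟨m / 2, by omega⟩
      rw [pvQ_even r (by omega)]
      exact ih r (by omega) (by omega)
    · rw [pvQ_odd m ho]; exact ho

theorem pvBits_zero : pvBits 0 = 0 := by
  simp [pvBits, PySem.Int.bitCount_zero]

theorem pvBits_two_mul (m : Nat) : pvBits (2 * m) = pvBits m := by
  rcases Nat.eq_zero_or_pos m with rfl | hm
  · simp
  · have := PySem.Int.bitCount_natCast (m := 2 * m) (by omega)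
    simp only [pvBits]
    rw [this]
    have : 2 * m / 2 = m := by omega
    simp [Nat.mul_mod_right, this]

theorem pvBits_two_mul_add_one (m : Nat) : pvBits (2 * m + 1) = pvBits m + 1 := by
  have := PySem.Int.bitCount_natCast (m := 2 * m + 1) (by omega)
  simp only [pvBits]
  rw [this]
  have h1 : (2 * m + 1) % 2 = 1 := by omega
  have h2 : (2 * m + 1) / 2 = m := by omega
  rw [h1, h2]; omega

-- Thue-Morse parity step: bits(m+1) + v2(m+1) ≡ bits(m) + 1 (mod 2)
theorem pvParityStep (m : Nat) : (pvBits (m + 1) + pvV2 (m + 1)) % 2 = (pvBits m + 1) % 2 := by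
  induction m using Nat.strong_induction_on with
  | _ m ih =>
    rcases Nat.mod_two_eq_zero_or_one m with he | ho
    · obtain ⟨k, rfl⟩ : ∃ k, m = 2 * k := ⟨m / 2, by omega⟩
      rw [pvBits_two_mul_add_one, pvV2_odd _ (by omega), pvBits_two_mul]
    · obtain ⟨k, rfl⟩ : ∃ k, m = 2 * k + 1 := ⟨m / 2, by omega⟩
      have h1 : 2 * k + 1 + 1 = 2 * (k + 1) := by ring
      rw [h1, pvBits_two_mul, pvV2_even (k + 1) (by omega), pvBits_two_mul_add_one]
      have := ih k (by omega)
      omega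

-- S(m) ≡ bits(m) (mod 2)
theorem pvSparity (m : Nat) : pvS m % 2 = ((pvBits m % 2 : Nat) : Int) := by
  induction m with
  | zero => simp [pvS, pvBits_zero]
  | succ m ih =>
    have hstep := pvParityStep m
    have hf : pvF (m + 1) % 2 = ((( pvV2 (m + 1) + 1) % 2 : Nat) : Int) := by
      unfold pvF
      rcases Nat.mod_two_eq_zero_or_one (pvV2 (m + 1)) with h | h
      · rw [if_neg (by omega)]
        split_ifs <;> omega
      · rw [if_pos h]; omega
    show (pvS m + pvF (m + 1)) % 2 = _
    omega

-- crux: bits(p-1) = bits(q-1) + e for p = 2^e * q, q odd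
theorem pvBitsDecomp (p : Nat) : ∀ _h : 1 ≤ p, pvBits (p - 1) = pvBits (pvQ p - 1) + pvV2 p := by
  induction p using Nat.strong_induction_on with
  | _ p ih =>
    intro h
    rcases Nat.mod_two_eq_zero_or_one p with he | ho
    · obtain ⟨r, rfl⟩ : ∃ r, p = 2 * r := ⟨p / 2, by omega⟩
      have hr : 1 ≤ r := by omega
      have h1 : 2 * r - 1 = 2 * (r - 1) + 1 := by omega
      rw [h1, pvBits_two_mul_add_one, pvQ_even r hr, pvV2_even r hr, ih r (by omega) hr]
      ring
    · rw [pvQ_odd p ho, pvV2_odd p ho]; omega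

-- Lemma II: f(2m+1) = (3 + 2 S(m)) % 4
theorem pvFoddIdx (m : Nat) : pvF (2 * m + 1) = (3 + 2 * pvS m) % 4 := by
  have hS := pvSparity m
  have hv : pvV2 (2 * m + 1) = 0 := pvV2_odd _ (by omega)
  have hq : pvQ (2 * m + 1) = 2 * m + 1 := pvQ_odd _ (by omega)
  have hm : (2 * m + 1 - 1) / 2 = m := by omega
  unfold pvF
  rw [hv, hq, hm]
  rw [if_neg (by omega)]
  rcases Nat.mod_two_eq_zero_or_one (pvBits m) with h | h
  · rw [if_pos h]; omega
  · rw [if_neg (by omega)]; omega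

-- Lemma III: f(2m+2) = (3 + 2 S(m) + f(m+1)) % 4
theorem pvFevenIdx (m : Nat) : pvF (2 * m + 2) = (3 + 2 * pvS m + pvF (m + 1)) % 4 := by
  set r := m + 1 with hr
  have hr1 : 1 ≤ r := by omega
  have h2r : 2 * m + 2 = 2 * r := by omega
  have hv2 : pvV2 (2 * r) = pvV2 r + 1 := pvV2_even r hr1
  have hq2 : pvQ (2 * r) = pvQ r := pvQ_even r hr1
  have hqodd : pvQ r % 2 = 1 := pvQ_odd_result r hr1
  have hqpos : 1 ≤ pvQ r := pvQ_pos r hr1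
  have hbm : pvBits m = pvBits ((pvQ r - 1) / 2) + pvV2 r := by
    have h1 : pvBits (r - 1) = pvBits (pvQ r - 1) + pvV2 r := pvBitsDecomp r hr1
    have h2 : pvQ r - 1 = 2 * ((pvQ r - 1) / 2) := by omega
    have h3 : pvBits (pvQ r - 1) = pvBits ((pvQ r - 1) / 2) := by
      rw [h2, pvBits_two_mul]
      congr 1
      omega
    have h4 : r - 1 = m := by omega
    rw [h4] at h1; omega
  have hS := pvSparity m
  rw [hbm] at hS
  unfold pvF
  rw [h2r, hv2, hq2]
  rcases Nat.mod_two_eq_zero_or_one (pvV2 r) with hv | hv <;>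
    rcases Nat.mod_two_eq_zero_or_one (pvBits ((pvQ r - 1) / 2)) with hb | hb
  · rw [if_pos (show (pvV2 r + 1) % 2 = 1 by omega),
      if_neg (show ¬ pvV2 r % 2 = 1 by omega), if_pos hb]
    omega
  · rw [if_pos (show (pvV2 r + 1) % 2 = 1 by omega),
      if_neg (show ¬ pvV2 r % 2 = 1 by omega), if_neg (show ¬ pvBits ((pvQ r - 1) / 2) % 2 = 0 by omega)]
    omega
  · rw [if_neg (show ¬ (pvV2 r + 1) % 2 = 1 by omega), if_pos hb, if_pos hv]
    omega
  · rw [if_neg (show ¬ (pvV2 r + 1) % 2 = 1 by omega),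
      if_neg (show ¬ pvBits ((pvQ r - 1) / 2) % 2 = 0 by omega), if_pos hv]
    omega

-- ((7 + x) published mod) equals emod by (3 + x) shape
theorem pvMod7 (x : Int) : PySem.Int.mod (7 + x) 4 = (3 + x) % 4 := by
  rw [PySem.Int.mod_eq_emod_of_pos (by norm_num)]
  omega

theorem pvE_concat (L : Nat) : pvE (L + 1) = pvE L ++ [pvF (1 + L)] := by
  unfold pvE
  rw [List.range'_1_concat, List.map_append]
  rfl

-- main fold characterisation over the closed-form list
theorem pvFoldMain : ∀ (L m : Nat),
    ((List.range' (m + 1) L).map pvF).foldl pvStepB (2 * pvS m, pvE (2 * m + 1)) =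
      (2 * pvS (m + L), pvE (2 * (m + L) + 1)) := by
  intro L
  induction L with
  | zero => intro m; simp
  | succ k ih =>
    intro m
    rw [List.range'_succ, List.map_cons, List.foldl_cons]
    have hs1 : pvS (m + 1) = pvS m + pvF (m + 1) := rfl
    have hA : PySem.Int.mod (7 + (2 * pvS m + pvF (m + 1))) 4 = pvF (2 * m + 2) := by
      rw [pvMod7, pvFevenIdx m]
      congr 1
      ring
    have hB : PySem.Int.mod (7 + (2 * pvS m + pvF (m + 1) + pvF (m + 1))) 4 =
        pvF (2 * m + 3) := by
      rw [pvMod7, show 2 * m + 3 = 2 * (m + 1) + 1 by ring, pvFoddIdx (m + 1), hs1]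
      congr 1
      ring
    have hE : pvE ((2 * m + 1) + 2) = pvE (2 * m + 1) ++ [pvF ((2 * m + 1) + 1)] ++ [pvF (1 + ((2 * m + 1) + 1))] := by
      rw [pvE_concat ((2 * m + 1) + 1), pvE_concat (2 * m + 1)]
      rw [show 1 + (2 * m + 1) = (2 * m + 1) + 1 by ring]
    have hE2 : pvE (2 * (m + 1) + 1) = pvE (2 * m + 1) ++ [pvF (2 * m + 2)] ++ [pvF (2 * m + 3)] := by
      simpa [show (2 * m + 1) + 1 = 2 * m + 2 by omega,
        show 1 + (2 * m + 2) = 2 * m + 3 by omega,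
        show 2 * (m + 1) + 1 = (2 * m + 1) + 2 by ring] using hE
    have hstep : pvStepB (2 * pvS m, pvE (2 * m + 1)) (pvF (m + 1)) =
        (2 * pvS (m + 1), pvE (2 * (m + 1) + 1)) := by
      unfold pvStepB
      dsimp only
      rw [hA, hB, hE2, hs1, Prod.mk.injEq]
      exact ⟨by ring, rfl⟩
    rw [hstep, show m + (k + 1) = (m + 1) + k by ring]
    exact ih (m + 1)

-- fold over pvE L starting from the seed state
theorem pvFoldE (L : Nat) :
    (pvE L).foldl pvStepB (0, [(3 : Int)]) = (2 * pvS L, pvE (2 * L + 1)) := by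
  have h1 : pvE 1 = [(3 : Int)] := by
    simp [pvE, pvF, pvV2, pvQ, pvBits, PySem.Int.bitCount_zero]
  have h0 : (2 : Int) * pvS 0 = 0 := by simp [pvS]
  have := pvFoldMain L 0
  rw [show (0:Nat) + 1 = 1 from rfl] at this
  simp only [Nat.zero_add] at this
  rw [← h1, ← h0]
  calc (pvE L).foldl pvStepB (2 * pvS 0, pvE 1)
      = ((List.range' 1 L).map pvF).foldl pvStepB (2 * pvS 0, pvE (2 * 0 + 1)) := rfl
    _ = (2 * pvS (0 + L), pvE (2 * (0 + L) + 1)) := pvFoldMain L 0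
    _ = (2 * pvS L, pvE (2 * L + 1)) := by rw [Nat.zero_add]

-- ===== reduction of port A's level step to the pvStepB fold =====
theorem foldl_pvStepB_shift (A : List Int) : ∀ (s : Int) (pre acc : List Int),
    A.foldl pvStepB (s, pre ++ acc)
      = ((A.foldl pvStepB (s, acc)).1, pre ++ (A.foldl pvStepB (s, acc)).2) := by
  induction A with
  | nil => intro s pre acc; rfl
  | cons a t ih =>
    intro s pre acc
    simp only [List.foldl_cons, pvStepB, List.append_assoc]
    exact ih _ _ _

theorem FracDelSub_eq_fold (A : List Int) (j : Int) (hj : 0 ≤ j)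
    (hlen : (A.length : Int) = 2 ^ j.toNat - 1) :
    FracDelSub A j = (A.foldl pvStepB (0, [(3 : Int)])).2 := by
  show [3] ++ ((PySem.List.pyRange 0 ((2:Int) ^ (j + 1).toNat - 2) 1).foldl
      (fun (p : Int × List Int) k =>
        (p.1 + PySem.List.pyGetD (A.flatMap fun x : Int => [x, x]) k 0,
          p.2 ++ [PySem.Int.mod (7 + (p.1 + PySem.List.pyGetD (A.flatMap fun x : Int => [x, x]) k 0)) 4]))
      ((0 : Int), ([] : List Int))).2 = _
  have hlenB : (A.flatMap fun x : Int => [x, x]).length = 2 * A.length := by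
    simp [List.length_flatMap, List.map_const']
    omega
  have hbound : (2:Int) ^ (j + 1).toNat - 2 = PySem.List.len (A.flatMap fun x : Int => [x, x]) := by
    have ht : (j + 1).toNat = j.toNat + 1 := by omega
    rw [ht, pow_succ]
    simp only [PySem.List.len, hlenB]
    push_cast
    omega
  rw [hbound,
    PySem.List.foldl_pyRange_pyGetD (A.flatMap fun x : Int => [x, x]) 0
      (fun (p : Int × List Int) x =>
        (p.1 + x, p.2 ++ [PySem.Int.mod (7 + (p.1 + x)) 4])) (0, []) (le_refl 0)]
  rw [Int.toNat_zero, List.drop_zero, List.foldl_flatMap]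
  have hcomp : (fun (acc : Int × List Int) (x : Int) =>
      List.foldl (fun (p : Int × List Int) x =>
        (p.1 + x, p.2 ++ [PySem.Int.mod (7 + (p.1 + x)) 4])) acc [x, x]) = pvStepB := by
    funext acc x
    simp only [List.foldl_cons, List.foldl_nil, pvStepB, List.append_assoc]
  rw [hcomp]
  have := foldl_pvStepB_shift A 0 [3] []
  simp only [List.append_nil] at this
  rw [this]

theorem pvE_length (L : Nat) : (pvE L).length = L := by
  simp [pvE]

-- one level of A's loop on the closed-form list (j ≥ 1)
theorem FracDelSub_on_E (j : Int) (hj : 1 ≤ j) :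
    FracDelSub (pvE (2 ^ j.toNat - 1)) j = pvE (2 ^ (j.toNat + 1) - 1) := by
  have hpow : 1 ≤ 2 ^ j.toNat := Nat.one_le_two_pow
  have hlen : ((pvE (2 ^ j.toNat - 1)).length : Int) = 2 ^ j.toNat - 1 := by
    rw [pvE_length, Nat.cast_sub hpow]
    push_cast
    ring
  rw [FracDelSub_eq_fold _ j (by omega) hlen, pvFoldE]
  dsimp only
  congr 1
  have h2 : 2 ^ (j.toNat + 1) = 2 * 2 ^ j.toNat := by rw [pow_succ]; ring
  omega

-- the whole level loop, from level a up to n, stays on the closed form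
theorem pvFoldLevels (b : Int) : ∀ (fuel : Nat) (a : Int), (b - a).toNat = fuel → 1 ≤ a → a ≤ b →
    (PySem.List.pyRange a b 1).foldl (fun A j => FracDelSub A j) (pvE (2 ^ a.toNat - 1)) =
      pvE (2 ^ b.toNat - 1) := by
  intro fuel
  induction fuel with
  | zero =>
    intro a hfa ha hab
    have : a = b := by omega
    subst this
    rw [PySem.List.pyRange_one_eq_nil (by omega)]
    rfl
  | succ k ih =>
    intro a hfa ha hab
    have hlt : a < b := by omega
    rw [PySem.List.pyRange_one_cons hlt]
    simp only [List.foldl_cons]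
    rw [FracDelSub_on_E a ha]
    have ht : (a + 1).toNat = a.toNat + 1 := by omega
    rw [← ht]
    exact ih (a + 1) (by omega) (by omega) (by omega)

-- ===== B-side bridges =====
theorem pvTermLoop_cast (p : Nat) : ∀ _hp : 1 ≤ p, ∀ e : Int,
    pvTermLoop (p : Int) e = ((pvQ p : Int), e + (pvV2 p : Int)) := by
  induction p using Nat.strong_induction_on with
  | _ p ih =>
    intro hp e
    have hmod : PySem.Int.mod (p : Int) 2 = ((p % 2 : Nat) : Int) := by
      rw [PySem.Int.mod_eq_emod_of_pos (by norm_num)]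
      push_cast
      omega
    rcases Nat.mod_two_eq_zero_or_one p with he | ho
    · have hdiv : PySem.Int.floordiv (p : Int) 2 = ((p / 2 : Nat) : Int) := by
        rw [PySem.Int.floordiv_eq_ediv_of_pos (by norm_num)]
        push_cast
        omega
      rw [pvTermLoop]
      rw [dif_pos ⟨by exact_mod_cast hp, by rw [hmod, he]; rfl⟩, hdiv]
      rw [ih (p / 2) (by omega) (by omega) (e + 1)]
      obtain ⟨r, rfl⟩ : ∃ r, p = 2 * r := ⟨p / 2, by omega⟩
      have hr : 1 ≤ r := by omega
      have h2 : 2 * r / 2 = r := by omega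
      rw [h2, pvQ_even r hr, pvV2_even r hr, Prod.mk.injEq]
      push_cast
      exact ⟨rfl, by ring⟩
    · rw [pvTermLoop]
      rw [dif_neg (by rw [hmod, ho]; simp), pvQ_odd p ho, pvV2_odd p ho]
      simp
theorem pvTerm_cast (p : Nat) (hp : 1 ≤ p) : pvTerm (p : Int) = pvF p := by
  unfold pvTerm
  rw [pvTermLoop_cast p hp 0]
  dsimp only
  have hq1 : 1 ≤ pvQ p := pvQ_pos p hp
  have hdiv : PySem.Int.floordiv ((pvQ p : Int) - 1) 2 = (((pvQ p - 1) / 2 : Nat) : Int) := by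
    rw [PySem.Int.floordiv_eq_ediv_of_pos (by norm_num)]
    have h1 : ((pvQ p : Int) - 1) = (((pvQ p - 1 : Nat)) : Int) := by omega
    rw [h1]
    push_cast
    omega
  have hmod : PySem.Int.mod (0 + (pvV2 p : Int)) 2 = ((pvV2 p % 2 : Nat) : Int) := by
    rw [PySem.Int.mod_eq_emod_of_pos (by norm_num)]
    push_cast
    omega
  rw [hdiv, hmod]
  have hbc : PySem.Int.bitCount (((pvQ p - 1) / 2 : Nat) : Int) = pvBits ((pvQ p - 1) / 2) := rfl
  rw [hbc]
  unfold pvF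
  rcases Nat.mod_two_eq_zero_or_one (pvV2 p) with hv | hv <;> rw [hv] <;> norm_num

-- pyRange 1 (L+1) maps to the closed-form list
theorem pvAltRange (L : Nat) :
    (PySem.List.pyRange 1 ((L : Int) + 1) 1).map pvTerm = pvE L := by
  rw [PySem.List.pyRange_one, List.map_map]
  have h1 : ((L : Int) + 1 - 1).toNat = L := by omega
  rw [h1]
  unfold pvE
  rw [List.range'_eq_map_range, List.map_map]
  apply List.map_congr_left
  intro k hk
  simp only [Function.comp_apply]
  have : (1 : Int) + (k : Int) = ((1 + k : Nat) : Int) := by push_cast; ring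
  rw [this, pvTerm_cast (1 + k) (by omega)]

theorem FracDel_alt_eq (n : Int) : FracDel_alt n = pvE (if 1 ≤ n then 2 ^ n.toNat - 1 else 1) := by
  unfold FracDel_alt
  split_ifs with h
  · have hpow : 1 ≤ 2 ^ n.toNat := Nat.one_le_two_pow
    have : (2 : Int) ^ n.toNat - 1 = (((2 ^ n.toNat - 1 : Nat)) : Int) := by push_cast [hpow]; ring
    simp only []
    rw [this, pvAltRange]
  · simp only []
    exact_mod_cast pvAltRange 1

-- ===== VERDICT (by name: the statement is the Claim_ definition above) =====
theorem FracDel_spec : Claim_equal_FracDel := by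
  intro n _
  unfold Spec_FracDel FracDel
  rw [FracDel_alt_eq]
  by_cases hn : 1 ≤ n
  · rw [if_pos hn]
    rw [PySem.List.pyRange_one_cons (by omega : (0:Int) < n)]
    simp only [List.foldl_cons]
    have h0 : FracDelSub [3] 0 = [3] := by decide
    have h1 : pvE (2 ^ (1 : Int).toNat - 1) = [(3 : Int)] := by
      simp [pvE, pvF, pvV2, pvQ, pvBits, PySem.Int.bitCount_zero]
    rw [h0, ← h1]
    exact pvFoldLevels n (n - 1).toNat 1 (by omega) (by omega) (by omega)
  · rw [if_neg hn, PySem.List.pyRange_one_eq_nil (by omega)]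
    have h1 : pvE 1 = [(3 : Int)] := by
      simp [pvE, pvF, pvV2, pvQ, pvBits, PySem.Int.bitCount_zero]
    rw [h1]
    rfl
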